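-- pv_equiv track=rewrite | github.com/adeuts03/Python-hangman | ps3.py | is_valid_word
-- ===== SOURCE A (Python) =====
-- VOWELS = 'aeiou'
--
-- def is_valid_word(word, hand, word_list):
--     """
--     Returns True if word is in the word_list and is entirely
--     composed of letters in the hand. Otherwise, returns False.
--     Does not mutate hand or word_list.
--
--     word: string
--     hand: dictionary (string -> int)
--     word_list: list of lowercase strings
--     returns: boolean
--     """
--     word2 = word.lower()
--
--     flag = []
--     for l in word2:
--         if l in hand.keys():
--             if hand[l] >= word2.count(l):
--                 flag.append(1)
--             else:
--                 flag.append(0)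
--         else:
--             flag.append(0)
--
--     new_words = []
--     flag2=[]
--     if "*" in word2:
--         for v in VOWELS:
--             new_word = word2.replace("*",v)
--             new_words.append(new_word)
--         for new_word in new_words:
--             if new_word in word_list:
--                 flag2.append(1)
--             else:
--                 flag2.append(0)
--
--         if 0 not in flag and 1 in flag2:
--             return True
--         else:
--             return False
--     else:
--         if 0 not in flag and word2 in word_list:
--             return True
--         else:
--             return False
-- ===== SOURCE B (Python) =====
-- VOWELS = 'aeiou'
--
--
-- def _wild_match(w, pat):
--     # True iff w equals pat with every '*' replaced by one common vowel.
--     if len(w) != len(pat):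
--         return False
--     v = None
--     for a, b in zip(w, pat):
--         if b == '*':
--             if v is None:
--                 v = a
--             elif a != v:
--                 return False
--         elif a != b:
--             return False
--     return v is not None and v in VOWELS
--
--
-- def is_valid_word(word, hand, word_list):
--     word2 = word.lower()
--     # availability: the sorted letters of word2 must be a sub-multiset of the
--     # sorted pool of letters the hand offers, checked by one two-pointer merge scan
--     remaining = sorted(word2)
--     pool = sorted(c for k, n in hand.items() if len(k) == 1 for c in k * n)
--     for c in pool:
--         if remaining and remaining[0] == c:
--             remaining = remaining[1:]
--     buildable = not remaining
--     # membership: scan the dictionary for a word matching word2's wildcard pattern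
--     if '*' in word2:
--         return buildable and any(_wild_match(w, word2) for w in word_list)
--     return buildable and word2 in word_list
-- ===== Notes on version B (the rewrite author's own statement) =====
-- stated objective: alternative
-- what changed: Availability is decided by sorting the word's letters and a letter pool expanded from the hand and running one two-pointer merge scan (a sub-multiset test) instead of A's per-letter count-and-compare 0/1 flag lists; wildcard membership scans word_list once with a pattern matcher instead of generating the five vowel substitutions and testing each.
import Mathlib
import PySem

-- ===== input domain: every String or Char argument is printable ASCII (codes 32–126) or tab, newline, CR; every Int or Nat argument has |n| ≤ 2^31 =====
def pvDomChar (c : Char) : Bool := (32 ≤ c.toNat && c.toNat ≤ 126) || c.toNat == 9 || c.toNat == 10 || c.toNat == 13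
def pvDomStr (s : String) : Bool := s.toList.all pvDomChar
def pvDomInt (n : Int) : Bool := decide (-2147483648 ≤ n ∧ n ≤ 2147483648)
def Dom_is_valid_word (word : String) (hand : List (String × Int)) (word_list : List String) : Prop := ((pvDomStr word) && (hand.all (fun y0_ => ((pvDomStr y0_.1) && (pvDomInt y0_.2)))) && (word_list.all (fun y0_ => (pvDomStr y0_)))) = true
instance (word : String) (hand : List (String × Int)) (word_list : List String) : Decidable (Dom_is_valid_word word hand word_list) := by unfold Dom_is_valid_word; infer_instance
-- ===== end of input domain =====

-- B decides letter availability by sorting the word's letters and a letter pool expanded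
-- from the hand and running one two-pointer merge scan (a sub-multiset test), instead of
-- A's per-letter count-and-compare 0/1 flag lists; for wildcard words B scans word_list
-- once with a pattern matcher instead of generating the five vowel substitutions.
-- Objective: alternative (same result, different algorithm; neither mutates its arguments).

-- ===== PORT A =====
def pvVOWELS : String := "aeiou"

def is_valid_word (word : String) (hand : List (String × Int)) (word_list : List String) : Bool :=
  let word2 := PySem.Str.lower word
  let handD : PySem.Dict String Int := PySem.Dict.mk hand
  -- for l in word2: append 1/0 to flag
  let flag : List Int := word2.toList.foldl (fun acc l =>
    match handD.get? (String.ofList [l]) with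
    | some v => if ((PySem.Str.count word2 (String.ofList [l]) : Int)) ≤ v then acc ++ [1] else acc ++ [0]
    | none => acc ++ [0]) []
  if PySem.Str.isIn "*" word2 then
    let new_words : List String := pvVOWELS.toList.foldl
      (fun acc v => acc ++ [PySem.Str.replace word2 "*" (String.ofList [v])]) []
    let flag2 : List Int := new_words.foldl
      (fun acc nw => if word_list.contains nw then acc ++ [1] else acc ++ [0]) []
    if !(flag.contains 0) && flag2.contains 1 then true else false
  else
    if !(flag.contains 0) && word_list.contains word2 then true else false

-- ===== PORT B =====
-- hand.items(): under the assoc-list dict convention (lookup = first match) the dict's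
-- items are the pairs with the FIRST occurrence of each key kept.
def pvItems (hand : List (String × Int)) : List (String × Int) :=
  hand.foldl (fun acc p => if acc.any (fun q => q.1 == p.1) then acc else acc ++ [p]) []

-- the letter pool the hand offers: chars of k * n for each single-letter key (k * n = '' for n ≤ 0)
def pvPool (hand : List (String × Int)) : List Char :=
  (pvItems hand).flatMap (fun kv =>
    if PySem.Str.len kv.1 == 1 then (List.replicate kv.2.toNat kv.1.toList).flatten else [])

-- one step of the two-pointer merge scan: consume the head of `remaining` when it matches
def pvStep (rem : List Char) (c : Char) : List Char :=
  match rem with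
  | [] => []
  | n :: ns => if n = c then ns else n :: ns

-- _wild_match's loop over zip(w, pat) with v as the common vowel seen so far (none = not yet set)
def pvWildGo : List (Char × Char) → Option Char → Bool
  | [], vo =>
    match vo with
    | none => false
    | some x => pvVOWELS.toList.contains x
  | (a, b) :: rest, vo =>
    if b = '*' then
      match vo with
      | none => pvWildGo rest (some a)
      | some x => if a ≠ x then false else pvWildGo rest (some x)
    else if a ≠ b then false else pvWildGo rest vo

-- _wild_match(w, pat)
def pvWildMatch (w pat : List Char) : Bool :=
  if w.length ≠ pat.length then false else pvWildGo (w.zip pat) none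

def is_valid_word_alt (word : String) (hand : List (String × Int)) (word_list : List String) : Bool :=
  let word2 := PySem.Str.lower word
  let need := PySem.List.sorted word2.toList (fun c => c) false
  let pool := PySem.List.sorted (pvPool hand) (fun c => c) false
  let remaining := pool.foldl pvStep need
  let buildable := remaining.isEmpty
  if PySem.Str.isIn "*" word2 then
    buildable && word_list.any (fun w => pvWildMatch w.toList word2.toList)
  else
    buildable && word_list.contains word2

-- ===== PRECONDITION & SPEC =====
def Spec_is_valid_word (word : String) (hand : List (String × Int)) (word_list : List String) (out : Bool) : Prop := out = is_valid_word_alt word hand word_list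
instance (word : String) (hand : List (String × Int)) (word_list : List String) (out : Bool) : Decidable (Spec_is_valid_word word hand word_list out) := by unfold Spec_is_valid_word; infer_instance

-- ===== CLAIM (what is proved, stated in full; the proofs are below) =====
def Claim_equal_is_valid_word : Prop := ∀ (word : String) (hand : List (String × Int)) (word_list : List String), Dom_is_valid_word word hand word_list → Spec_is_valid_word word hand word_list (is_valid_word word hand word_list)

-- ===== LEMMAS AND PROOFS =====

-- substitution of v for '*' (the meaning of word2.replace('*', v))
def pvSubst (v c : Char) : Char := if c = '*' then v else c

-- ---- A-side bookkeeping (flag / flag2 lists) ----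

theorem pv_go_singleton (c : Char) (l : List Char) (fuel acc : Nat) (h : l.length ≤ fuel) :
    PySem.Chars.count.go [c] fuel l acc = acc + l.count c := by
  induction l generalizing fuel acc with
  | nil => cases fuel <;> simp [PySem.Chars.count.go]
  | cons hd t ih =>
    cases fuel with
    | zero => simp at h
    | succ f =>
      rw [PySem.Chars.count.go.eq_def]
      simp only [List.length_cons] at h
      by_cases hc : hd = c
      · subst hc
        simp only [List.isPrefixOf, beq_self_eq_true, Bool.and_true, List.length_cons,
          List.count_cons_self, if_true, List.length_nil, Nat.zero_add, List.drop_succ_cons,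
          List.drop_zero]
        rw [ih f (acc + 1) (by omega)]
        omega
      · have hp : ([c].isPrefixOf (hd :: t)) = false := by
          simp [List.isPrefixOf]
          exact fun e => hc e.symm
        simp only [hp, Bool.false_eq_true, if_false]
        rw [ih f acc (by omega)]; simp [hc]

theorem pv_count_singleton (cs : List Char) (c : Char) : PySem.Chars.count cs [c] = cs.count c := by
  simp [PySem.Chars.count, pv_go_singleton c cs cs.length 0 le_rfl]

theorem pv_count_char (word2 : String) (l : Char) :
    ((PySem.Str.count word2 (String.ofList [l]) : Int)) = ((word2.toList.count l : Int)) := by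
  simp [PySem.Str.count, pv_count_singleton]

theorem pv_contains_one_foldl (f : String → Bool) (xs : List String) (acc : List Int) :
    (xs.foldl (fun a x => if f x then a ++ [1] else a ++ [0]) acc).contains (1 : Int)
      = (acc.contains 1 || xs.any f) := by
  induction xs generalizing acc with
  | nil => simp
  | cons x t ih =>
    simp only [List.foldl_cons, List.any_cons]
    by_cases hf : f x = true
    · rw [if_pos hf, ih, hf]
      simp
    · simp only [Bool.not_eq_true] at hf
      rw [if_neg (by simp [hf]), ih, hf]
      simp

theorem pv_contains_zero_foldl (f : Char → Bool) (xs : List Char) (acc : List Int) :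
    (xs.foldl (fun a x => if f x then a ++ [1] else a ++ [0]) acc).contains (0 : Int)
      = (acc.contains 0 || xs.any (fun x => !(f x))) := by
  induction xs generalizing acc with
  | nil => simp
  | cons x t ih =>
    simp only [List.foldl_cons, List.any_cons]
    by_cases hf : f x = true
    · rw [if_pos hf, ih, hf]
      simp
    · simp only [Bool.not_eq_true] at hf
      rw [if_neg (by simp [hf]), ih, hf]
      simp

-- A's flag loop agrees with the "every letter's count is covered" predicate
theorem pv_flagA (cs : List Char) (d : PySem.Dict String Int) :
    (!((cs.foldl (fun acc l =>
        match d.get? (String.ofList [l]) with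
        | some v => if ((cs.count l : Int)) ≤ v then acc ++ [1] else acc ++ [0]
        | none => acc ++ [0]) ([] : List Int)).contains 0))
    = decide (∀ c ∈ cs, ((cs.count c : Int)) ≤ d.getD (String.ofList [c]) 0) := by
  have hbody : (fun (acc : List Int) (l : Char) =>
      match d.get? (String.ofList [l]) with
      | some v => if ((cs.count l : Int)) ≤ v then acc ++ [1] else acc ++ [0]
      | none => acc ++ [0])
      = (fun acc l => if (match d.get? (String.ofList [l]) with
          | some v => decide ((cs.count l : Int) ≤ v)
          | none => false) then acc ++ [1] else acc ++ [0]) := by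
    funext acc l
    cases d.get? (String.ofList [l]) with
    | none => simp
    | some v => by_cases h : ((cs.count l : Int)) ≤ v <;> simp [h]
  rw [hbody, pv_contains_zero_foldl]
  rw [List.contains_nil, Bool.false_or, ← List.all_eq_not_any_not]
  rw [Bool.eq_iff_iff, List.all_eq_true, decide_eq_true_eq]
  constructor
  · intro h c hc
    have := h c hc
    cases hg : d.get? (String.ofList [c]) with
    | none => rw [hg] at this; simp at this
    | some v =>
      rw [hg] at this
      have hv : d.getD (String.ofList [c]) 0 = v := PySem.Dict.getD_of_get?_eq_some _ _ hg
      rw [hv]; simpa using this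
  · intro h c hc
    have hcount : 1 ≤ cs.count c := List.one_le_count_iff.mpr hc
    have hle := h c hc
    cases hg : d.get? (String.ofList [c]) with
    | none =>
      have hv : d.getD (String.ofList [c]) 0 = 0 := PySem.Dict.getD_of_get?_eq_none _ _ hg
      rw [hv] at hle
      exfalso; omega
    | some v =>
      have hv : d.getD (String.ofList [c]) 0 = v := PySem.Dict.getD_of_get?_eq_some _ _ hg
      rw [hv] at hle
      simp [hle]

-- A's star branch computes "some vowel substitution is in word_list"
theorem pv_member_star (word2 : String) (word_list : List String) :
    ((pvVOWELS.toList.foldl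
        (fun acc v => acc ++ [PySem.Str.replace word2 "*" (String.ofList [v])]) ([] : List String)).foldl
        (fun acc nw => if word_list.contains nw then acc ++ [1] else acc ++ [0]) ([] : List Int)).contains (1 : Int)
    = pvVOWELS.toList.any (fun v => word_list.contains (PySem.Str.replace word2 "*" (String.ofList [v]))) := by
  rw [pv_contains_one_foldl]
  rw [List.contains_nil, Bool.false_or]
  rw [PySem.List.foldl_append_singleton_eq_map, List.nil_append, List.any_map]
  rfl

-- ---- B-side: the two-pointer scan decides the sublist relation ----

theorem pv_scan_nil (pool : List Char) : pool.foldl pvStep [] = [] := by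
  induction pool with
  | nil => rfl
  | cons p ps ih => simpa [pvStep] using ih

theorem pv_scan_empty_iff (pool need : List Char) :
    pool.foldl pvStep need = [] ↔ need.Sublist pool := by
  induction pool generalizing need with
  | nil => simp
  | cons p ps ih =>
    cases need with
    | nil =>
      simp only [List.foldl_cons, List.nil_sublist, iff_true]
      show List.foldl pvStep (pvStep [] p) ps = []
      simpa [pvStep] using pv_scan_nil ps
    | cons n ns =>
      simp only [List.foldl_cons, pvStep]
      by_cases h : n = p
      · subst h
        rw [if_pos rfl, ih]
        exact ⟨fun hs => hs.cons₂ n, fun hs => List.cons_sublist_cons.mp hs⟩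
      · rw [if_neg h, ih]
        constructor
        · exact fun hs => hs.cons p
        · intro hs
          cases hs with
          | cons _ hs => exact hs
          | cons₂ hs => exact absurd rfl h

-- on sorted lists, sublist = sub-multiset = pointwise count inequality
theorem pv_sorted_sublist_iff_counts (need pool : List Char)
    (hn : need.Pairwise (· ≤ ·)) (hp : pool.Pairwise (· ≤ ·)) :
    need.Sublist pool ↔ ∀ x ∈ need, need.count x ≤ pool.count x := by
  constructor
  · intro h x _
    exact h.count_le x
  · intro h
    exact List.sublist_of_subperm_of_pairwise (List.subperm_ext_iff.mpr h) hn hp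

-- ---- B-side: counting the pool ----

-- recursive view of pvItems
def pvD : List (String × Int) → List String → List (String × Int)
  | [], _ => []
  | p :: t, seen => if seen.contains p.1 then pvD t seen else p :: pvD t (seen ++ [p.1])

theorem pv_items_eq_pvD (l : List (String × Int)) (acc : List (String × Int)) :
    l.foldl (fun acc p => if acc.any (fun q => q.1 == p.1) then acc else acc ++ [p]) acc
      = acc ++ pvD l (acc.map (·.1)) := by
  induction l generalizing acc with
  | nil => simp [pvD]
  | cons p t ih =>
    have hcond : (acc.any (fun q => q.1 == p.1)) = (acc.map (·.1)).contains p.1 := by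
      induction acc with
      | nil => rfl
      | cons a as iha =>
        simp only [List.any_cons, List.map_cons, List.contains_cons]
        have hsw : (a.1 == p.1) = (p.1 == a.1) := by
          rw [Bool.eq_iff_iff, beq_iff_eq, beq_iff_eq]; exact eq_comm
        rw [hsw, iha]
    simp only [List.foldl_cons, pvD, hcond]
    by_cases hc : ((acc.map (·.1)).contains p.1) = true
    · rw [if_pos hc, ih, if_pos (by simpa using hc)]
    · rw [if_neg hc, ih, if_neg (by simpa using hc)]
      simp

theorem pv_count_expand (p : String × Int) (x : Char) :
    ((if PySem.Str.len p.1 == 1 then (List.replicate p.2.toNat p.1.toList).flatten else []).count x)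
      = if p.1 = String.ofList [x] then p.2.toNat else 0 := by
  have hflat : ∀ (n : Nat) (c : Char), (List.replicate n [c]).flatten = List.replicate n c := by
    intro n c
    induction n with
    | zero => rfl
    | succ m ih => simp [List.replicate_succ, ih]
  have hofl : ∀ (s : String), (s = String.ofList [x]) ↔ s.toList = [x] := by
    intro s
    constructor
    · intro h; rw [h]; simp
    · intro h
      have := congrArg String.ofList h
      simpa using this
  by_cases hlen : PySem.Str.len p.1 == 1
  · rw [if_pos hlen]
    have hl1 : p.1.toList.length = 1 := by simpa [PySem.Str.len_eq] using hlen
    obtain ⟨c, hc⟩ : ∃ c, p.1.toList = [c] := by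
      cases h : p.1.toList with
      | nil => rw [h] at hl1; simp at hl1
      | cons a t =>
        rw [h] at hl1; simp at hl1
        exact ⟨a, by simp [hl1]⟩
    rw [hc, hflat, List.count_replicate]
    by_cases hcx : c = x
    · have hp : p.1 = String.ofList [x] := (hofl p.1).mpr (by rw [hc, hcx])
      simp [hcx, hp]
    · have hp : ¬ (p.1 = String.ofList [x]) := by
        intro h
        have h2 := (hofl p.1).mp h
        rw [hc] at h2
        exact hcx (by simpa using h2)
      simp [hcx, hp]
  · rw [if_neg (by simpa using hlen)]
    have hp : ¬ (p.1 = String.ofList [x]) := by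
      intro h
      apply hlen
      have h2 := (hofl p.1).mp h
      simp [PySem.Str.len, h2]
    simp [hp]

theorem pv_count_pvD (l : List (String × Int)) (seen : List String) (x : Char) :
    ((pvD l seen).flatMap (fun kv =>
        if PySem.Str.len kv.1 == 1 then (List.replicate kv.2.toNat kv.1.toList).flatten else [])).count x
      = if String.ofList [x] ∈ seen then 0
        else match l.find? (fun p => p.1 == String.ofList [x]) with
          | none => 0
          | some p => p.2.toNat := by
  induction l generalizing seen with
  | nil => simp [pvD]
  | cons p t ih =>
    simp only [pvD]
    by_cases hc : seen.contains p.1 = true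
    · rw [if_pos hc, ih]
      have hc' : p.1 ∈ seen := by simpa using hc
      by_cases hk : p.1 = String.ofList [x]
      · have hm : String.ofList [x] ∈ seen := hk ▸ hc'
        simp [hm]
      · rw [List.find?_cons_of_neg (by simpa using hk)]
    · rw [if_neg hc]
      have hc' : ¬ p.1 ∈ seen := by simpa using hc
      simp only [List.flatMap_cons, List.count_append]
      rw [pv_count_expand, ih]
      by_cases hk : p.1 = String.ofList [x]
      · have hm1 : ¬ String.ofList [x] ∈ seen := hk ▸ hc'
        have hm2 : String.ofList [x] ∈ seen ++ [p.1] := by simp [hk]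
        rw [List.find?_cons_of_pos (by simpa using hk)]
        simp [hk, hm1]
      · rw [if_neg hk]
        rw [List.find?_cons_of_neg (by simpa using hk)]
        by_cases hm : String.ofList [x] ∈ seen
        · simp [hm]
        · have hm2 : ¬ (String.ofList [x] ∈ seen ++ [p.1]) := by
            simp only [List.mem_append, List.mem_singleton]
            rintro (h | h)
            · exact hm h
            · exact hk h.symm
          simp [hm, hm2]

theorem pv_count_pool (hand : List (String × Int)) (x : Char) :
    (pvPool hand).count x
      = match (PySem.Dict.mk hand).get? (String.ofList [x]) with
        | none => 0
        | some v => v.toNat := by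
  unfold pvPool pvItems
  rw [pv_items_eq_pvD]
  simp only [List.nil_append, List.map_nil]
  rw [pv_count_pvD]
  simp only [List.not_mem_nil, if_false]
  show _ = (match (Option.map (fun x => x.2) (List.find? (fun p => p.1 == String.ofList [x]) hand)) with
    | none => 0 | some v => v.toNat)
  cases hf : List.find? (fun p => p.1 == String.ofList [x]) hand <;> simp

-- ---- B-side: the wildcard matcher ----

theorem pv_wildGo_iff (l : List (Char × Char)) (vo : Option Char) :
    pvWildGo l vo = true ↔ ∃ v, pvVOWELS.toList.contains v = true
      ∧ (vo = some v ∨ (vo = none ∧ ∃ p ∈ l, p.2 = '*'))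
      ∧ ∀ p ∈ l, p.1 = if p.2 = '*' then v else p.2 := by
  induction l generalizing vo with
  | nil =>
    cases vo with
    | none => simp [pvWildGo]
    | some x =>
      show pvVOWELS.toList.contains x = true ↔ _
      constructor
      · intro h
        exact ⟨x, h, Or.inl rfl, by intro p hp; simp at hp⟩
      · rintro ⟨v, hv, hvo, -⟩
        rcases hvo with h | ⟨h, -⟩
        · obtain rfl : x = v := Option.some.inj h
          exact hv
        · exact absurd h (by simp)
  | cons q rest ih =>
    obtain ⟨a, b⟩ := q
    by_cases hb : b = '*'
    · subst hb
      cases vo with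
      | none =>
        have hstep : pvWildGo ((a, '*') :: rest) none = pvWildGo rest (some a) := by
          simp [pvWildGo]
        rw [hstep, ih]
        constructor
        · rintro ⟨v, hv, hvo, hall⟩
          rcases hvo with h | ⟨h, -⟩
          · obtain rfl : a = v := Option.some.inj h
            refine ⟨a, hv, Or.inr ⟨rfl, ⟨(a, '*'), List.mem_cons_self, rfl⟩⟩, ?_⟩
            intro p hp
            rcases List.mem_cons.mp hp with rfl | hp'
            · simp
            · exact hall p hp'
          · exact absurd h (by simp)
        · rintro ⟨v, hv, hvo, hall⟩
          have ha : a = v := by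
            have := hall (a, '*') List.mem_cons_self
            simpa using this
          exact ⟨v, hv, Or.inl (by rw [ha]), fun p hp => hall p (List.mem_cons_of_mem _ hp)⟩
      | some x =>
        have hstep : pvWildGo ((a, '*') :: rest) (some x)
            = (if a ≠ x then false else pvWildGo rest (some x)) := by
          simp [pvWildGo]
        rw [hstep]
        by_cases hax : a = x
        · subst hax
          rw [if_neg (by simp), ih]
          constructor
          · rintro ⟨v, hv, hvo, hall⟩
            rcases hvo with h | ⟨h, -⟩
            · obtain rfl : a = v := Option.some.inj h
              refine ⟨a, hv, Or.inl rfl, ?_⟩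
              intro p hp
              rcases List.mem_cons.mp hp with rfl | hp'
              · simp
              · exact hall p hp'
            · exact absurd h (by simp)
          · rintro ⟨v, hv, hvo, hall⟩
            rcases hvo with h | ⟨h, -⟩
            · exact ⟨v, hv, Or.inl h, fun p hp => hall p (List.mem_cons_of_mem _ hp)⟩
            · exact absurd h (by simp)
        · rw [if_pos hax]
          simp only [Bool.false_eq_true, false_iff]
          rintro ⟨v, hv, hvo, hall⟩
          rcases hvo with h | ⟨h, -⟩
          · have hxv : x = v := Option.some.inj h
            have ha : a = v := by
              have := hall (a, '*') List.mem_cons_self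
              simpa using this
            exact hax (by rw [ha, hxv])
          · exact absurd h (by simp)
    · have hstep : pvWildGo ((a, b) :: rest) vo
          = (if a ≠ b then false else pvWildGo rest vo) := by
        simp [pvWildGo, hb]
      rw [hstep]
      by_cases hab : a = b
      · subst hab
        rw [if_neg (by simp), ih]
        constructor
        · rintro ⟨v, hv, hvo, hall⟩
          refine ⟨v, hv, ?_, fun p hp => ?_⟩
          · rcases hvo with h | ⟨h, hex⟩
            · exact Or.inl h
            · rcases hex with ⟨p, hp, hps⟩
              exact Or.inr ⟨h, ⟨p, List.mem_cons_of_mem _ hp, hps⟩⟩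
          · rcases List.mem_cons.mp hp with rfl | hp'
            · simp [hb]
            · exact hall p hp'
        · rintro ⟨v, hv, hvo, hall⟩
          refine ⟨v, hv, ?_, fun p hp => hall p (List.mem_cons_of_mem _ hp)⟩
          rcases hvo with h | ⟨h, hex⟩
          · exact Or.inl h
          · refine Or.inr ⟨h, ?_⟩
            rcases hex with ⟨p, hp, hps⟩
            rcases List.mem_cons.mp hp with rfl | hp'
            · exact absurd hps hb
            · exact ⟨p, hp', hps⟩
      · rw [if_pos hab]
        simp only [Bool.false_eq_true, false_iff]
        rintro ⟨v, hv, hvo, hall⟩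
        have := hall (a, b) List.mem_cons_self
        simp only [if_neg hb] at this
        exact hab this

theorem pv_zip_pointwise (v : Char) (wl pat : List Char) (h : wl.length = pat.length) :
    ((∀ p ∈ wl.zip pat, p.1 = if p.2 = '*' then v else p.2) ↔ wl = pat.map (pvSubst v)) := by
  induction pat generalizing wl with
  | nil =>
    cases wl with
    | nil => simp
    | cons a t => simp at h
  | cons b bt ih =>
    cases wl with
    | nil => simp at h
    | cons a at' =>
      simp only [List.zip_cons_cons, List.map_cons, List.cons.injEq]
      rw [List.forall_mem_cons]
      have hlen : at'.length = bt.length := by simpa using h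
      constructor
      · rintro ⟨h1, h2⟩
        exact ⟨by simpa [pvSubst] using h1, (ih at' hlen).mp h2⟩
      · rintro ⟨h1, h2⟩
        exact ⟨by simpa [pvSubst] using h1, (ih at' hlen).mpr h2⟩

theorem pv_wildMatch_iff (wl pat : List Char) (hstar : '*' ∈ pat) :
    pvWildMatch wl pat = true ↔ ∃ v, pvVOWELS.toList.contains v = true ∧ wl = pat.map (pvSubst v) := by
  unfold pvWildMatch
  by_cases hl : wl.length ≠ pat.length
  · rw [if_pos hl]
    simp only [Bool.false_eq_true, false_iff]
    rintro ⟨v, hv, hmap⟩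
    exact hl (by simp [hmap])
  · rw [if_neg hl]
    rw [not_ne_iff] at hl
    rw [pv_wildGo_iff]
    constructor
    · rintro ⟨v, hv, hvo, hall⟩
      exact ⟨v, hv, (pv_zip_pointwise v wl pat hl).mp hall⟩
    · rintro ⟨v, hv, hmap⟩
      refine ⟨v, hv, Or.inr ⟨rfl, ?_⟩, (pv_zip_pointwise v wl pat hl).mpr hmap⟩
      have hm : (wl.zip pat).map Prod.snd = pat := List.map_snd_zip (le_of_eq hl.symm)
      rw [← hm] at hstar
      rcases List.mem_map.mp hstar with ⟨p, hp, hps⟩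
      exact ⟨p, hp, hps⟩

-- replace with single-char pattern and replacement is a map
theorem pv_replace_go (v : Char) (l : List Char) (fuel : Nat) (acc : List Char)
    (h : l.length ≤ fuel) :
    PySem.Chars.replace.go ['*'] [v] fuel l acc = acc.reverse ++ l.map (pvSubst v) := by
  induction l generalizing fuel acc with
  | nil => cases fuel <;> simp [PySem.Chars.replace.go]
  | cons c t ih =>
    cases fuel with
    | zero => simp at h
    | succ f =>
      rw [PySem.Chars.replace.go.eq_def]
      simp only [List.length_cons] at h
      by_cases hc : c = '*'
      · subst hc
        have hp : ((['*'] : List Char).isPrefixOf ('*' :: t)) = true := by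
          simp [List.isPrefixOf]
        simp only [hp, if_true, List.length_cons, List.length_nil, Nat.zero_add,
          List.drop_succ_cons, List.drop_zero, List.reverse_singleton]
        rw [ih f ([v] ++ acc) (by omega)]
        simp [pvSubst]
      · have hp : ((['*'] : List Char).isPrefixOf (c :: t)) = false := by
          simp [List.isPrefixOf]
          exact fun e => hc e.symm
        simp only [hp, Bool.false_eq_true, if_false]
        rw [ih f (c :: acc) (by omega)]
        simp [pvSubst, hc]

theorem pv_replace_map (cs : List Char) (v : Char) :
    PySem.Chars.replace cs ['*'] [v] = cs.map (pvSubst v) := by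
  rw [PySem.Chars.replace]
  rw [if_neg (by simp)]
  simpa using pv_replace_go v cs cs.length [] le_rfl

-- the two membership computations agree when word2 contains '*'
theorem pv_member_eq (word2 : String) (word_list : List String)
    (hstar : '*' ∈ word2.toList) :
    word_list.any (fun w => pvWildMatch w.toList word2.toList)
      = pvVOWELS.toList.any (fun v => word_list.contains (PySem.Str.replace word2 "*" (String.ofList [v]))) := by
  have ht : ∀ v : Char, (PySem.Str.replace word2 "*" (String.ofList [v])).toList
      = word2.toList.map (pvSubst v) := by
    intro v
    rw [PySem.Str.toList_replace]
    have h1 : ("*" : String).toList = ['*'] := rfl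
    have h2 : (String.ofList [v]).toList = [v] := by simp
    rw [h1, h2, pv_replace_map]
  rw [Bool.eq_iff_iff]
  simp only [List.any_eq_true]
  constructor
  · rintro ⟨w, hw, hm⟩
    rcases (pv_wildMatch_iff w.toList word2.toList hstar).mp hm with ⟨v, hv, hmap⟩
    refine ⟨v, by simpa using hv, ?_⟩
    have heq : PySem.Str.replace word2 "*" (String.ofList [v]) = w := by
      apply String.toList_inj.mp
      rw [ht v, hmap]
    rw [heq]
    simpa using hw
  · rintro ⟨v, hv, hc⟩
    have hw : PySem.Str.replace word2 "*" (String.ofList [v]) ∈ word_list := by simpa using hc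
    refine ⟨_, hw, ?_⟩
    apply (pv_wildMatch_iff _ _ hstar).mpr
    exact ⟨v, by simpa using hv, ht v⟩

-- ---- assembling buildability ----

theorem pv_toNat_iff (n : Nat) (v : Int) (h : 1 ≤ n) : (n ≤ v.toNat) ↔ ((n : Int) ≤ v) := by
  omega

theorem pv_buildable_eq (word2 : String) (hand : List (String × Int)) :
    ((PySem.List.sorted (pvPool hand) (fun c => c) false).foldl pvStep
        (PySem.List.sorted word2.toList (fun c => c) false)).isEmpty
      = decide (∀ c ∈ word2.toList, ((word2.toList.count c : Int)) ≤ (PySem.Dict.mk hand).getD (String.ofList [c]) 0) := by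
  rw [Bool.eq_iff_iff, List.isEmpty_iff, decide_eq_true_eq]
  rw [pv_scan_empty_iff]
  rw [pv_sorted_sublist_iff_counts _ _ (PySem.List.sorted_pairwise _ _) (PySem.List.sorted_pairwise _ _)]
  have hpn := PySem.List.sorted_perm word2.toList (fun c => c) false
  have hpp := PySem.List.sorted_perm (pvPool hand) (fun c => c) false
  constructor
  · intro h c hc
    have hc' : c ∈ PySem.List.sorted word2.toList (fun c => c) false := hpn.mem_iff.mpr hc
    have hcc := h c hc'
    rw [hpn.count_eq, hpp.count_eq, pv_count_pool] at hcc
    have hcnt : 1 ≤ word2.toList.count c := List.one_le_count_iff.mpr hc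
    cases hg : (PySem.Dict.mk hand).get? (String.ofList [c]) with
    | none =>
      simp only [hg] at hcc
      rw [PySem.Dict.getD_of_get?_eq_none _ _ hg]
      omega
    | some v =>
      simp only [hg] at hcc
      rw [PySem.Dict.getD_of_get?_eq_some _ _ hg]
      exact (pv_toNat_iff _ _ hcnt).mp hcc
  · intro h c hc
    have hc' : c ∈ word2.toList := hpn.mem_iff.mp hc
    have hcc := h c hc'
    rw [hpn.count_eq, hpp.count_eq, pv_count_pool]
    have hcnt : 1 ≤ word2.toList.count c := List.one_le_count_iff.mpr hc'
    cases hg : (PySem.Dict.mk hand).get? (String.ofList [c]) with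
    | none =>
      rw [PySem.Dict.getD_of_get?_eq_none _ _ hg] at hcc
      omega
    | some v =>
      rw [PySem.Dict.getD_of_get?_eq_some _ _ hg] at hcc
      exact (pv_toNat_iff _ _ hcnt).mpr hcc

-- ===== VERDICT (by name: the statement is the Claim_ definition above) =====
theorem is_valid_word_spec : Claim_equal_is_valid_word := by
  intro word hand word_list _
  unfold Spec_is_valid_word
  simp only [is_valid_word, is_valid_word_alt]
  rw [pv_buildable_eq]
  simp only [pv_count_char]
  rw [pv_flagA (PySem.Str.lower word).toList (PySem.Dict.mk hand)]
  by_cases hs : PySem.Str.isIn "*" (PySem.Str.lower word) = true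
  · have hstar : '*' ∈ (PySem.Str.lower word).toList := by
      have h := (PySem.Str.isIn_iff_infix "*" (PySem.Str.lower word)).mp hs
      have h2 : ['*'] <:+: (PySem.Str.lower word).toList := by simpa using h
      exact List.singleton_sublist.mp h2.sublist
    simp only [hs, if_true]
    rw [pv_member_star, ← pv_member_eq _ _ hstar]
    cases _hda : (decide (∀ c ∈ (PySem.Str.lower word).toList,
        (((PySem.Str.lower word).toList.count c : Int)) ≤ (PySem.Dict.mk hand).getD (String.ofList [c]) 0)
      && word_list.any (fun w => pvWildMatch w.toList (PySem.Str.lower word).toList)) <;> simp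
  · simp only [Bool.not_eq_true] at hs
    simp only [hs, Bool.false_eq_true, if_false]
    cases _hda : (decide (∀ c ∈ (PySem.Str.lower word).toList,
        (((PySem.Str.lower word).toList.count c : Int)) ≤ (PySem.Dict.mk hand).getD (String.ofList [c]) 0)
      && word_list.contains (PySem.Str.lower word)) <;> simp
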